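-- pv_equiv track=rewrite | github.com/hwennnn/leetcode-solutions | problems/bitwise_xor_of_all_pairings/solution.py | xorAllNums
-- ===== SOURCE A (Python) =====
-- from typing import List
--
-- def xorAllNums(nums1: List[int], nums2: List[int]) -> int:
--     n1, n2 = len(nums1), len(nums2)
--
--     xor = 0
--     if n2 % 2 != 0:
--         for x in nums1:
--             xor ^= x
--
--     if n1 % 2 != 0:
--         for x in nums2:
--             xor ^= x
--
--     return xor
-- ===== SOURCE B (Python) =====
-- from typing import List
--
-- def xorAllNums(nums1: List[int], nums2: List[int]) -> int:
--     xor = 0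
--     for a in nums1:
--         for b in nums2:
--             xor ^= a ^ b
--     return xor
-- ===== Notes on version B (the rewrite author's own statement) =====
-- stated objective: alternative
-- what changed: B computes the XOR of every pairing literally with a nested loop over both arrays, instead of A's parity-based single passes over each array.
import Mathlib
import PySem

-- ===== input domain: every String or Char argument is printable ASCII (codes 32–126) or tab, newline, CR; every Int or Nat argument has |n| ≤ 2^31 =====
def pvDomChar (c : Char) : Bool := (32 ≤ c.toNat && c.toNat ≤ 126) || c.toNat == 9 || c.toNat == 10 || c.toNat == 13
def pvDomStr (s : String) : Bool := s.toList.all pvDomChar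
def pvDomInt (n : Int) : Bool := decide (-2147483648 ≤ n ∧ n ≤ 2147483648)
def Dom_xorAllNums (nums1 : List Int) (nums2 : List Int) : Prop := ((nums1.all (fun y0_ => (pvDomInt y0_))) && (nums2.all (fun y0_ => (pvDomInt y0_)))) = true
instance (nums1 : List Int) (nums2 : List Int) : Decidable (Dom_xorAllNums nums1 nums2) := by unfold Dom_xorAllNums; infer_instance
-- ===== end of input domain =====

-- B replaces A's parity-based single passes by a literal brute-force nested loop over all pairings (alternative decomposition, same results; not faster).
-- ===== PORT A =====
def xorAllNums (nums1 : List Int) (nums2 : List Int) : Int :=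
  let n1 : Int := nums1.length
  let n2 : Int := nums2.length
  let xor0 : Int := 0
  let xor1 : Int :=
    if PySem.Int.mod n2 2 ≠ 0 then nums1.foldl (fun acc x => PySem.Int.bxor acc x) xor0 else xor0
  let xor2 : Int :=
    if PySem.Int.mod n1 2 ≠ 0 then nums2.foldl (fun acc x => PySem.Int.bxor acc x) xor1 else xor1
  xor2

-- ===== PORT B =====
def xorAllNums_alt (nums1 : List Int) (nums2 : List Int) : Int :=
  nums1.foldl (fun acc a => nums2.foldl (fun acc b => PySem.Int.bxor acc (PySem.Int.bxor a b)) acc) 0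

-- ===== PRECONDITION & SPEC =====
def Spec_xorAllNums (nums1 : List Int) (nums2 : List Int) (out : Int) : Prop := out = xorAllNums_alt nums1 nums2
instance (nums1 : List Int) (nums2 : List Int) (out : Int) : Decidable (Spec_xorAllNums nums1 nums2 out) := by unfold Spec_xorAllNums; infer_instance

-- ===== CLAIM (what is proved, stated in full; the proofs are below) =====
def Claim_equal_xorAllNums : Prop := ∀ (nums1 : List Int) (nums2 : List Int), Dom_xorAllNums nums1 nums2 → Spec_xorAllNums nums1 nums2 (xorAllNums nums1 nums2)

-- ===== LEMMAS AND PROOFS =====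

-- sign/magnitude encoding of an Int: bxor acts componentwise through it
def pvEnc (a : Int) : Bool × Nat := (decide (a < 0), (if 0 ≤ a then a else -a - 1).toNat)

theorem pvEnc_inj (a b : Int) (h : pvEnc a = pvEnc b) : a = b := by
  unfold pvEnc at h
  rw [Prod.mk.injEq] at h
  obtain ⟨h1, h2⟩ := h
  rw [decide_eq_decide] at h1
  split_ifs at h2 with ha hb
  all_goals omega

theorem pvEnc_bxor (a b : Int) :
    pvEnc (PySem.Int.bxor a b) = (xor (pvEnc a).1 (pvEnc b).1, (pvEnc a).2 ^^^ (pvEnc b).2) := by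
  unfold pvEnc PySem.Int.bxor
  by_cases ha : 0 ≤ a <;> by_cases hb : 0 ≤ b <;>
    simp [ha, hb, show ∀ n : Nat, ¬ ((n : Int) < 0) from fun n => by omega]
  all_goals first
    | omega
    | · generalize ((-a).toNat - 1 ^^^ b.toNat : ℕ) = n
        rw [if_neg (by omega : ¬ (1:Int) ≤ -(n:Int))]
        refine ⟨?_, by omega⟩
        simp [show a < 0 from by omega, show ¬ b < 0 from by omega]
        omega
    | · generalize (a.toNat ^^^ (-b).toNat - 1 : ℕ) = n
        rw [if_neg (by omega : ¬ (1:Int) ≤ -(n:Int))]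
        refine ⟨?_, by omega⟩
        simp [show ¬ a < 0 from by omega, show b < 0 from by omega]
        omega

theorem bxor_assoc (a b c : Int) :
    PySem.Int.bxor (PySem.Int.bxor a b) c = PySem.Int.bxor a (PySem.Int.bxor b c) := by
  apply pvEnc_inj
  simp [pvEnc_bxor, Nat.xor_assoc]

theorem bxor_left_comm (a b c : Int) :
    PySem.Int.bxor a (PySem.Int.bxor b c) = PySem.Int.bxor b (PySem.Int.bxor a c) := by
  rw [← bxor_assoc, PySem.Int.bxor_comm a b, bxor_assoc]

theorem zero_bxor (a : Int) : PySem.Int.bxor 0 a = a := by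
  rw [PySem.Int.bxor_comm, PySem.Int.bxor_zero]

theorem bxor_cancel (a b : Int) : PySem.Int.bxor a (PySem.Int.bxor a b) = b := by
  rw [← bxor_assoc, PySem.Int.bxor_self, zero_bxor]

-- XOR of a whole list
def pvXlist (l : List Int) : Int := l.foldl PySem.Int.bxor 0

theorem foldl_bxor_shift (l : List Int) (x : Int) :
    l.foldl PySem.Int.bxor x = PySem.Int.bxor x (pvXlist l) := by
  induction l generalizing x with
  | nil => simp [pvXlist, PySem.Int.bxor_zero]
  | cons b t ih =>
    have hx : pvXlist (b :: t) = PySem.Int.bxor b (pvXlist t) := by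
      show List.foldl PySem.Int.bxor 0 (b :: t) = _
      rw [List.foldl_cons, ih, zero_bxor]
    rw [List.foldl_cons, ih, hx, bxor_assoc]

theorem pvXlist_cons (b : Int) (t : List Int) :
    pvXlist (b :: t) = PySem.Int.bxor b (pvXlist t) := by
  show List.foldl PySem.Int.bxor 0 (b :: t) = _
  rw [List.foldl_cons, foldl_bxor_shift, zero_bxor]

theorem inner_loop (a : Int) (l : List Int) (x : Int) :
    l.foldl (fun acc b => PySem.Int.bxor acc (PySem.Int.bxor a b)) x
      = PySem.Int.bxor x (PySem.Int.bxor (if l.length % 2 = 1 then a else 0) (pvXlist l)) := by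
  induction l generalizing x with
  | nil => simp [pvXlist, PySem.Int.bxor_zero]
  | cons b t ih =>
    rw [List.foldl_cons, ih, pvXlist_cons, List.length_cons]
    rcases Nat.even_or_odd t.length with he | ho
    · have h1 : t.length % 2 = 0 := Nat.even_iff.mp he
      have h2 : (t.length + 1) % 2 = 1 := by omega
      rw [h1, h2]
      simp only [if_neg (by omega : ¬ (0 : Nat) % 2 = 1)]
      simp [bxor_left_comm, PySem.Int.bxor_comm, bxor_cancel, PySem.Int.bxor_zero]
    · have h1 : t.length % 2 = 1 := Nat.odd_iff.mp ho
      have h2 : (t.length + 1) % 2 = 0 := by omega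
      rw [h1, h2]
      simp only [if_neg (by omega : ¬ (0 : Nat) % 2 = 1)]
      simp [bxor_left_comm, PySem.Int.bxor_comm, bxor_cancel, PySem.Int.bxor_zero]

theorem outer_loop (P : Prop) [Decidable P] (c : Int) (l : List Int) (x : Int) :
    l.foldl (fun acc a => PySem.Int.bxor acc (PySem.Int.bxor (if P then a else 0) c)) x
      = PySem.Int.bxor x (PySem.Int.bxor (if P then pvXlist l else 0)
          (if l.length % 2 = 1 then c else 0)) := by
  induction l generalizing x with
  | nil => simp [pvXlist, PySem.Int.bxor_zero]
  | cons b t ih =>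
    rw [List.foldl_cons, ih, pvXlist_cons, List.length_cons]
    rcases Nat.even_or_odd t.length with he | ho
    · have h1 : t.length % 2 = 0 := Nat.even_iff.mp he
      have h2 : (t.length + 1) % 2 = 1 := by omega
      rw [h1, h2]
      by_cases hp : P <;>
        simp [hp, bxor_left_comm, PySem.Int.bxor_comm, bxor_cancel, PySem.Int.bxor_self,
          PySem.Int.bxor_zero]
    · have h1 : t.length % 2 = 1 := Nat.odd_iff.mp ho
      have h2 : (t.length + 1) % 2 = 0 := by omega
      rw [h1, h2]
      by_cases hp : P <;>
        simp [hp, bxor_left_comm, PySem.Int.bxor_comm, bxor_cancel, PySem.Int.bxor_self,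
          PySem.Int.bxor_zero]

theorem mod2_coe (n : Nat) : PySem.Int.mod (n : Int) 2 ≠ 0 ↔ n % 2 = 1 := by
  simp only [PySem.Int.mod, Int.fmod_eq_emod_of_nonneg _ (by norm_num : (0:Int) ≤ 2)]
  omega

theorem alt_closed (nums1 nums2 : List Int) :
    xorAllNums_alt nums1 nums2
      = PySem.Int.bxor (if nums2.length % 2 = 1 then pvXlist nums1 else 0)
          (if nums1.length % 2 = 1 then pvXlist nums2 else 0) := by
  unfold xorAllNums_alt
  have hstep : (fun (acc a : Int) => nums2.foldl (fun acc b => PySem.Int.bxor acc (PySem.Int.bxor a b)) acc)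
      = fun acc a => PySem.Int.bxor acc (PySem.Int.bxor (if nums2.length % 2 = 1 then a else 0) (pvXlist nums2)) := by
    funext acc a
    rw [inner_loop]
  rw [hstep, outer_loop, zero_bxor]

theorem a_closed (nums1 nums2 : List Int) :
    xorAllNums nums1 nums2
      = PySem.Int.bxor (if nums2.length % 2 = 1 then pvXlist nums1 else 0)
          (if nums1.length % 2 = 1 then pvXlist nums2 else 0) := by
  unfold xorAllNums
  have e1 : (fun (acc x : Int) => PySem.Int.bxor acc x) = PySem.Int.bxor := rfl
  simp only [e1, mod2_coe]
  by_cases h2 : nums2.length % 2 = 1 <;> by_cases h1 : nums1.length % 2 = 1 <;>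
    simp [h1, h2, foldl_bxor_shift, zero_bxor, PySem.Int.bxor_zero]

-- ===== VERDICT (by name: the statement is the Claim_ definition above) =====
theorem xorAllNums_spec : Claim_equal_xorAllNums := by
  intro nums1 nums2 _
  unfold Spec_xorAllNums
  rw [a_closed, alt_closed]
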